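-- pv_equiv track=rewrite | github.com/Prateek-Pandey-96/Algorithms | LC Daily/Python solutions/Grumpy Bookstore Owner.py | maxSatisfied
-- ===== SOURCE A (Python) =====
-- from typing import List
--
-- def maxSatisfied(customers: List[int], grumpy: List[int], minutes: int) -> int:
--     total_customers = 0
--     for idx in range(len(grumpy)):
--         if grumpy[idx]==0:
--             total_customers += customers[idx]
--
--     extra_customers = 0
--     for idx in range(minutes):
--         if grumpy[idx]==1:
--             extra_customers += customers[idx]
--
--     ans = total_customers + extra_customers
--
--     for idx in range(minutes, len(grumpy)):
--         if grumpy[idx]==1: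
--             extra_customers += customers[idx]
--         if grumpy[idx-minutes]==1:
--             extra_customers -= customers[idx-minutes]
--         ans = max(ans, total_customers+extra_customers)
--
--     return ans
-- ===== SOURCE B (Python) =====
-- def maxSatisfied(customers, grumpy, minutes):
--     base = 0
--     pre = [0]
--     for c, g in zip(customers, grumpy):
--         if g == 0:
--             base += c
--         pre.append(pre[-1] + (c if g == 1 else 0))
--     best = pre[minutes]
--     for s in range(1, len(grumpy) - minutes + 1):
--         best = max(best, pre[s + minutes] - pre[s])
--     return base + best
-- ===== Notes on version B (the rewrite author's own statement) =====
-- stated objective: alternative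
-- what changed: B precomputes a prefix-sum table of grumpy-suppressed customers in one pass and takes the best window as a range difference pre[s+minutes]-pre[s], instead of A's running add/drop sliding-window accumulator.
-- outside the precondition, e.g. on maxSatisfied([], [5, 7], 0): A returns 0, B raises IndexError
import Mathlib
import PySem

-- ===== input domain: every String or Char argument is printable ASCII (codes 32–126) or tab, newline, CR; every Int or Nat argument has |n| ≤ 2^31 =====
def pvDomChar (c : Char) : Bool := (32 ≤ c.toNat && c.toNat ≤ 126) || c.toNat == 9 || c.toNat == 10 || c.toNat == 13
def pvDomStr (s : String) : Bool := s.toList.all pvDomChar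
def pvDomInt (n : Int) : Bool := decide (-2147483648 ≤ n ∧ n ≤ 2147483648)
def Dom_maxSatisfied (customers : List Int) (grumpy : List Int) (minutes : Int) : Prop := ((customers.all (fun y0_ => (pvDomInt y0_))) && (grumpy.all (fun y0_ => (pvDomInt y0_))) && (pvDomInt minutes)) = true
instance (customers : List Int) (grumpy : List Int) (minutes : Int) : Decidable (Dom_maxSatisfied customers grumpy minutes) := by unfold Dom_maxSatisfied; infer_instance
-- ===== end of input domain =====

-- B replaces A's running add/drop sliding-window accumulator by a prefix-sum table of
-- grumpy-suppressed customers queried as range differences (objective: alternative decomposition).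


-- ===== PORT A =====
def maxSatisfied (customers : List Int) (grumpy : List Int) (minutes : Int) : Int :=
  let total := (PySem.List.pyRange 0 (grumpy.length : Int) 1).foldl
    (fun acc idx => if PySem.List.pyGetD grumpy idx 0 == 0 then acc + PySem.List.pyGetD customers idx 0 else acc) 0
  let extra := (PySem.List.pyRange 0 minutes 1).foldl
    (fun acc idx => if PySem.List.pyGetD grumpy idx 0 == 1 then acc + PySem.List.pyGetD customers idx 0 else acc) 0
  let st := (PySem.List.pyRange minutes (grumpy.length : Int) 1).foldl
    (fun (st : Int × Int) idx =>
      let e1 := if PySem.List.pyGetD grumpy idx 0 == 1 then st.1 + PySem.List.pyGetD customers idx 0 else st.1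
      let e2 := if PySem.List.pyGetD grumpy (idx - minutes) 0 == 1 then e1 - PySem.List.pyGetD customers (idx - minutes) 0 else e1
      (e2, max st.2 (total + e2)))
    (extra, total + extra)
  st.2

-- ===== PORT B =====
def maxSatisfied_alt (customers : List Int) (grumpy : List Int) (minutes : Int) : Int :=
  let st := (customers.zip grumpy).foldl
    (fun (st : Int × List Int) cg =>
      (if cg.2 == 0 then st.1 + cg.1 else st.1,
       st.2 ++ [PySem.List.pyGetD st.2 (-1) 0 + (if cg.2 == 1 then cg.1 else 0)]))
    (0, [0])
  let base := st.1
  let pre := st.2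
  let best := (PySem.List.pyRange 1 ((grumpy.length : Int) - minutes + 1) 1).foldl
    (fun b s => max b (PySem.List.pyGetD pre (s + minutes) 0 - PySem.List.pyGetD pre s 0))
    (PySem.List.pyGetD pre minutes 0)
  base + best

-- ===== PRECONDITION & SPEC =====
-- Pre_ excludes exactly the inputs where A raises IndexError (minutes < 0 or minutes > len(grumpy),
-- where A's window loops index out of range), plus customers shorter than grumpy, on which A returns
-- only accidentally when every grumpy entry past len(customers) is neither 0 nor 1; B raises there.
def Pre_maxSatisfied (customers : List Int) (grumpy : List Int) (minutes : Int) : Prop :=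
  grumpy.length ≤ customers.length ∧ 0 ≤ minutes ∧ minutes ≤ (grumpy.length : Int)
instance (customers : List Int) (grumpy : List Int) (minutes : Int) : Decidable (Pre_maxSatisfied customers grumpy minutes) := by unfold Pre_maxSatisfied; infer_instance
def pvWitness_maxSatisfied : List Int × List Int × Int := ([1, 0, 4, 2, 5], [0, 1, 0, 1, 1], 2)

def Spec_maxSatisfied (customers : List Int) (grumpy : List Int) (minutes : Int) (out : Int) : Prop := out = maxSatisfied_alt customers grumpy minutes
instance (customers : List Int) (grumpy : List Int) (minutes : Int) (out : Int) : Decidable (Spec_maxSatisfied customers grumpy minutes out) := by unfold Spec_maxSatisfied; infer_instance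

-- ===== CLAIM (what is proved, stated in full; the proofs are below) =====
def Claim_equal_maxSatisfied : Prop := ∀ (customers : List Int) (grumpy : List Int) (minutes : Int), Dom_maxSatisfied customers grumpy minutes → Pre_maxSatisfied customers grumpy minutes → Spec_maxSatisfied customers grumpy minutes (maxSatisfied customers grumpy minutes)

-- ===== LEMMAS AND PROOFS =====

-- recovered customers contributed by one zipped (customer, grumpy) pair
def pvW (p : Int × Int) : Int := if p.2 == 1 then p.1 else 0
-- prefix sum of recovered customers over the first k zipped pairs
def pvS (l : List (Int × Int)) (k : Nat) : Int := ((l.take k).map pvW).sum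
-- the running prefix sums B's first loop appends after the seed 0
def pvSums : List (Int × Int) → Int → List Int
  | [], _ => []
  | p :: t, v => (v + pvW p) :: pvSums t (v + pvW p)
-- index-wise forms of the same quantities
def pvE (customers grumpy : List Int) (j : Nat) : Int :=
  if grumpy.getD j 0 == 1 then customers.getD j 0 else 0
def pvSS (customers grumpy : List Int) (r : Nat) : Int :=
  ((List.range r).map (pvE customers grumpy)).sum

theorem pre_foldl (l : List (Int × Int)) : ∀ (p : List Int) (x : Int),
    l.foldl (fun q cg => q ++ [PySem.List.pyGetD q (-1) 0 + (if cg.2 == 1 then cg.1 else 0)]) (p ++ [x])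
      = p ++ [x] ++ pvSums l x := by
  induction l with
  | nil => intro p x; simp [pvSums]
  | cons cg t ih =>
    intro p x
    simp only [List.foldl_cons, PySem.List.pyGetD_neg_one_append_singleton, pvSums]
    have := ih (p ++ [x]) (x + pvW cg)
    simp only [pvW] at this
    rw [this]
    simp [pvW]

theorem pvSums_getElem? (l : List (Int × Int)) : ∀ (v : Int) (j : Nat), j < l.length →
    (pvSums l v)[j]? = some (v + pvS l (j + 1)) := by
  induction l with
  | nil => intro v j h; simp at h
  | cons cg t ih =>
    intro v j h
    cases j with
    | zero => simp [pvSums, pvS]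
    | succ j =>
      simp only [pvSums, List.getElem?_cons_succ]
      rw [ih (v + pvW cg) j (by simpa using h)]
      simp [pvS, add_assoc]

theorem pre_getD (l : List (Int × Int)) (j : Nat) (h : j ≤ l.length) :
    (((0 : Int) :: pvSums l 0)).getD j 0 = pvS l j := by
  cases j with
  | zero => simp [pvS]
  | succ j =>
    simp only [List.getD, List.getElem?_cons_succ]
    rw [pvSums_getElem? l 0 j (by omega)]
    simp

theorem range_map_getD {α : Type} (l : List α) (d : α) (k : Nat) (h : k ≤ l.length) :
    (List.range k).map (fun j => l.getD j d) = l.take k := by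
  apply List.ext_getElem
  · simp [h]
  · intro i h1 h2
    simp at h1 h2 ⊢
    rw [List.getElem?_eq_getElem (by omega)]
    rfl

theorem pvS_eq_sum (l : List (Int × Int)) (j : Nat) (h : j ≤ l.length) :
    pvS l j = ((List.range j).map (fun i => pvW (l.getD i (0, 0)))).sum := by
  rw [pvS, ← range_map_getD l (0,0) j h, List.map_map]
  rfl

theorem windows (t : Int) (E : Nat → Int) (m : Nat) (k : Nat) :
    ((List.range k).foldl (fun (st : Int × Int) j =>
        let x := st.1 + E (m + j) - E j
        (x, max st.2 (t + x)))
      (((List.range m).map E).sum - ((List.range 0).map E).sum, t + ((List.range m).map E).sum))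
    = (((List.range (m + k)).map E).sum - ((List.range k).map E).sum,
       t + (List.range k).foldl (fun b j => max b (((List.range (m + j + 1)).map E).sum - ((List.range (j + 1)).map E).sum)) (((List.range m).map E).sum)) := by
  induction k with
  | zero => simp
  | succ k ih =>
    rw [List.range_succ, List.foldl_append, List.foldl_append, ih]
    simp only [List.foldl_cons, List.foldl_nil, Prod.mk.injEq]
    constructor
    · simp only [Nat.add_succ, List.range_succ, List.map_append, List.sum_append, List.map_cons,
        List.sum_cons, List.map_nil, List.sum_nil]
      ring
    · show max _ (t + _) = _
      rw [max_add_add_left]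
      simp only [Nat.add_succ, List.range_succ, List.map_append, List.sum_append, List.map_cons,
        List.sum_cons, List.map_nil, List.sum_nil]
      ring_nf

theorem zip_getD (customers grumpy : List Int) (j : Nat)
    (h1 : j < grumpy.length) (h2 : grumpy.length ≤ customers.length) :
    (customers.zip grumpy).getD j (0, 0) = (customers.getD j 0, grumpy.getD j 0) := by
  have hz : j < (customers.zip grumpy).length := by simp [List.length_zip]; omega
  rw [List.getD_eq_getElem _ _ hz, List.getElem_zip,
      List.getD_eq_getElem _ _ (by omega), List.getD_eq_getElem _ _ h1]

-- ===== VERDICT (by name: the statement is the Claim_ definition above) =====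
theorem maxSatisfied_spec : Claim_equal_maxSatisfied := by
  intro customers grumpy minutes _ hpre
  obtain ⟨hlen, hm0, hmn⟩ := hpre
  obtain ⟨m, rfl⟩ : ∃ m : Nat, minutes = (m : Int) := ⟨minutes.toNat, (Int.toNat_of_nonneg hm0).symm⟩
  have hm : m ≤ grumpy.length := by exact_mod_cast hmn
  have hzl : (customers.zip grumpy).length = grumpy.length := by
    simp [List.length_zip]; omega
  -- common value of A's `total_customers` and B's `base`
  have htotal :
      (PySem.List.pyRange 0 (grumpy.length : Int) 1).foldl
        (fun acc idx => if PySem.List.pyGetD grumpy idx 0 == 0 then acc + PySem.List.pyGetD customers idx 0 else acc) 0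
      = (customers.zip grumpy).foldl (fun acc cg => if cg.2 == 0 then acc + cg.1 else acc) 0 := by
    rw [PySem.List.pyRange_one]
    simp only [sub_zero, Int.toNat_natCast, List.foldl_map]
    have h1 : (customers.zip grumpy).foldl (fun acc cg => if cg.2 == 0 then acc + cg.1 else acc) 0
        = ((List.range grumpy.length).map (fun j => (customers.zip grumpy).getD j (0,0))).foldl
            (fun acc cg => if cg.2 == 0 then acc + cg.1 else acc) 0 := by
      rw [range_map_getD _ _ _ (by omega)]
      congr 1
      rw [← hzl, List.take_length]
    rw [h1, List.foldl_map]
    apply PySem.List.foldl_congr_mem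
    intro acc j hj
    simp only [List.mem_range] at hj
    rw [zip_getD customers grumpy j hj hlen]
    simp
  -- A's initial `extra_customers` equals pvSS m
  have hextra :
      (PySem.List.pyRange 0 (m : Int) 1).foldl
        (fun acc idx => if PySem.List.pyGetD grumpy idx 0 == 1 then acc + PySem.List.pyGetD customers idx 0 else acc) 0
      = pvSS customers grumpy m := by
    rw [PySem.List.pyRange_one]
    simp only [sub_zero, Int.toNat_natCast, List.foldl_map]
    have h2 : ∀ (acc : Int) (j : Nat), j ∈ List.range m →
        (if PySem.List.pyGetD grumpy ((0:Int) + j) 0 == 1 then acc + PySem.List.pyGetD customers ((0:Int) + j) 0 else acc)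
        = acc + pvE customers grumpy j := by
      intro acc j _
      simp only [zero_add, PySem.List.pyGetD_natCast, pvE]
      split <;> simp
    rw [PySem.List.foldl_congr_mem _ _ _ _ h2, PySem.List.foldl_add]
    simp [pvSS]
  -- lookups into B's prefix table
  have hpreTab : ∀ j : Nat, j ≤ grumpy.length →
      PySem.List.pyGetD ((0 : Int) :: pvSums (customers.zip grumpy) 0) (j : Int) 0
      = pvSS customers grumpy j := by
    intro j hj
    rw [PySem.List.pyGetD_natCast, pre_getD _ _ (by omega),
        pvS_eq_sum _ _ (by omega), pvSS]
    congr 1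
    apply List.map_congr_left
    intro i hi
    simp only [List.mem_range] at hi
    rw [zip_getD customers grumpy i (by omega) hlen]
    rfl
  -- evaluate A
  have hA : maxSatisfied customers grumpy (m : Int)
      = (customers.zip grumpy).foldl (fun acc cg => if cg.2 == 0 then acc + cg.1 else acc) 0
        + (List.range (grumpy.length - m)).foldl
            (fun b j => max b (pvSS customers grumpy (m + j + 1) - pvSS customers grumpy (j + 1)))
            (pvSS customers grumpy m) := by
    unfold maxSatisfied
    simp only [htotal, hextra]
    rw [PySem.List.pyRange_one]
    have hcount : ((grumpy.length : Int) - (m : Int)).toNat = grumpy.length - m := by omega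
    rw [hcount, List.foldl_map]
    have hbody : ∀ (st : Int × Int) (j : Nat), j ∈ List.range (grumpy.length - m) →
        (let e1 := if PySem.List.pyGetD grumpy ((m : Int) + j) 0 == 1 then st.1 + PySem.List.pyGetD customers ((m : Int) + j) 0 else st.1
         let e2 := if PySem.List.pyGetD grumpy ((m : Int) + j - m) 0 == 1 then e1 - PySem.List.pyGetD customers ((m : Int) + j - m) 0 else e1
         (e2, max st.2 ((customers.zip grumpy).foldl (fun acc cg => if cg.2 == 0 then acc + cg.1 else acc) 0 + e2)))
        = (let x := st.1 + pvE customers grumpy (m + j) - pvE customers grumpy j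
           (x, max st.2 ((customers.zip grumpy).foldl (fun acc cg => if cg.2 == 0 then acc + cg.1 else acc) 0 + x))) := by
      intro st j _
      have hidx : ((m : Int) + j) = ((m + j : Nat) : Int) := by push_cast; ring
      have hidx2 : ((m : Int) + j - m) = ((j : Nat) : Int) := by ring
      rw [hidx2, hidx]
      simp only [PySem.List.pyGetD_natCast, pvE]
      split <;> split <;> simp
    rw [PySem.List.foldl_congr_mem _ _ _ _ hbody]
    have := windows ((customers.zip grumpy).foldl (fun acc cg => if cg.2 == 0 then acc + cg.1 else acc) 0)
      (pvE customers grumpy) m (grumpy.length - m)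
    simp only [List.range_zero, List.map_nil, List.sum_nil, sub_zero] at this
    show (_ : Int × Int).2 = _
    rw [show (List.range (grumpy.length - m)).foldl
        (fun (st : Int × Int) j =>
          let x := st.1 + pvE customers grumpy (m + j) - pvE customers grumpy j
          (x, max st.2 ((customers.zip grumpy).foldl (fun acc cg => if cg.2 == 0 then acc + cg.1 else acc) 0 + x)))
        (pvSS customers grumpy m,
         (customers.zip grumpy).foldl (fun acc cg => if cg.2 == 0 then acc + cg.1 else acc) 0 + pvSS customers grumpy m)
      = _ from this]
    simp only [pvSS]
  -- evaluate B
  have hB : maxSatisfied_alt customers grumpy (m : Int)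
      = (customers.zip grumpy).foldl (fun acc cg => if cg.2 == 0 then acc + cg.1 else acc) 0
        + (List.range (grumpy.length - m)).foldl
            (fun b j => max b (pvSS customers grumpy (m + j + 1) - pvSS customers grumpy (j + 1)))
            (pvSS customers grumpy m) := by
    unfold maxSatisfied_alt
    rw [PySem.List.foldl_prod_mk
        (f := fun acc (cg : Int × Int) => if cg.2 == 0 then acc + cg.1 else acc)
        (g := fun q (cg : Int × Int) => q ++ [PySem.List.pyGetD q (-1) 0 + (if cg.2 == 1 then cg.1 else 0)])]
    have hpreL : (customers.zip grumpy).foldl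
        (fun q (cg : Int × Int) => q ++ [PySem.List.pyGetD q (-1) 0 + (if cg.2 == 1 then cg.1 else 0)]) [(0 : Int)]
        = (0 : Int) :: pvSums (customers.zip grumpy) 0 := by
      rw [show [(0 : Int)] = [] ++ [(0:Int)] from rfl, pre_foldl]
      simp
    simp only [hpreL]
    congr 1
    have hcount2 : (((grumpy.length : Int) - m + 1) - 1).toNat = grumpy.length - m := by omega
    rw [PySem.List.pyRange_one, hcount2, List.foldl_map]
    have hbody2 : ∀ (b : Int) (j : Nat), j ∈ List.range (grumpy.length - m) →
        max b (PySem.List.pyGetD ((0 : Int) :: pvSums (customers.zip grumpy) 0) ((1 : Int) + j + m) 0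
               - PySem.List.pyGetD ((0 : Int) :: pvSums (customers.zip grumpy) 0) ((1 : Int) + j) 0)
        = max b (pvSS customers grumpy (m + j + 1) - pvSS customers grumpy (j + 1)) := by
      intro b j hj
      simp only [List.mem_range] at hj
      have h1 : ((1 : Int) + j + m) = ((m + j + 1 : Nat) : Int) := by push_cast; ring
      have h2 : ((1 : Int) + j) = ((j + 1 : Nat) : Int) := by push_cast; ring
      rw [h1, h2, hpreTab (m + j + 1) (by omega), hpreTab (j + 1) (by omega)]
    rw [PySem.List.foldl_congr_mem _ _ _ _ hbody2, hpreTab m (by omega)]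
  unfold Spec_maxSatisfied
  rw [hA, hB]
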